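-- pv_equiv track=rewrite | github.com/Deathbytray17/Implementation-of-TBR-Analysis | TBR_Analysis.py | compute_useful
-- ===== SOURCE A (Python) =====
-- def compute_useful(dependencies, dependent_vars):
--     """
--     Compute the set of variables useful for computing dependent variables.
--     """
--     useful = set(dependent_vars)
--     changed = True
--     while changed:
--         changed = False
--         for var, inputs in dependencies.items():
--             if var in useful and any(inp not in useful for inp in inputs):
--                 useful.update(inputs)
--                 changed = True
--     return useful
-- ===== SOURCE B (Python) =====
-- def compute_useful(dependencies, dependent_vars):
--     """
--     Compute the set of variables useful for computing dependent variables.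
--     Single worklist propagation: each variable's inputs are pulled exactly
--     once, when the variable is first discovered useful.
--     """
--     useful = set(dependent_vars)
--     stack = list(dependent_vars)
--     while stack:
--         var = stack.pop()
--         for inp in dependencies.get(var, ()):
--             if inp not in useful:
--                 useful.add(inp)
--                 stack.append(inp)
--     return useful
-- ===== Notes on version B (the rewrite author's own statement) =====
-- stated objective: alternative
-- what changed: A rescans the whole dependency dict until a fixpoint (a pass per growth step, O(V*E) worst case); B does one worklist propagation that looks each discovered variable up once (O(V+E) with dict hashing), though on the benchmark inputs A converges in one pass and B measured no speedup.
import Mathlib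
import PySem

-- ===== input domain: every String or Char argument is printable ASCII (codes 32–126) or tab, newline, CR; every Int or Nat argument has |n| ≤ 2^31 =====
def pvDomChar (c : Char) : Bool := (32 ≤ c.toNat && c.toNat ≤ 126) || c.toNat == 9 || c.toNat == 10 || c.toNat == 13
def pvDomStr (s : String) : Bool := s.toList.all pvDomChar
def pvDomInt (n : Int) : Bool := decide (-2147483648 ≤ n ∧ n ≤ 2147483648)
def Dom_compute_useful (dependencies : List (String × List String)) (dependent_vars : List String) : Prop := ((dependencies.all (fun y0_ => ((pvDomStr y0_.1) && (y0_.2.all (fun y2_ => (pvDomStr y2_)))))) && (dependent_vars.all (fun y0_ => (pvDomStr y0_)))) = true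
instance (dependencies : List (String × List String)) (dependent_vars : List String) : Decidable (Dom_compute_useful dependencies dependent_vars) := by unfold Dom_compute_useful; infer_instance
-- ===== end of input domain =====

-- B replaces A's repeated fixpoint rescans of the whole dict by a single worklist
-- propagation (each discovered variable is looked up once).
-- Both Pythons return a SET (no observable order); each port therefore returns the
-- set's distinct elements in sorted order — the canonical representative of the same
-- finite set (outputs of the Pythons are compared as finite sets).

-- ===== PORT A =====
-- one 'for var, inputs in dependencies.items():' pass of A's while-loop;
-- state = (useful, changed), started each pass at (useful, False)
def passA (deps : List (String × List String)) (u : PySem.Set String) :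
    PySem.Set String × Bool :=
  deps.foldl
    (fun acc vi =>
      if PySem.Set.contains acc.1 vi.1 && vi.2.any (fun inp => !PySem.Set.contains acc.1 inp)
      then (PySem.Set.update acc.1 vi.2, true)
      else acc)
    (u, false)

-- A's 'while changed:' loop; the Nat fuel only makes the same computation total —
-- it is proved sufficient below (loopA_spec), so the 0-fuel arm is never reached
def loopA (deps : List (String × List String)) : Nat → PySem.Set String → PySem.Set String
  | 0, u => u
  | fuel + 1, u =>
    let p := passA deps u
    if p.2 then loopA deps fuel p.1 else p.1

def compute_useful (dependencies : List (String × List String)) (dependent_vars : List String) : List String :=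
  PySem.List.sorted
    (loopA dependencies
      (dependent_vars.length + (dependencies.flatMap (fun p => p.2)).length + 1)
      (PySem.Set.ofList dependent_vars))
    (fun x => x) false

-- ===== PORT B =====
-- B's 'while stack:' worklist; var = stack.pop() (the last element), then
-- 'for inp in dependencies.get(var, ()):' pushes each newly discovered input.
-- The Nat fuel only makes the same computation total (proved sufficient in loopB_spec).
def loopB (deps : List (String × List String)) : Nat → PySem.Set String → List String → PySem.Set String
  | 0, u, _ => u
  | _ + 1, u, [] => u
  | fuel + 1, u, x :: xs =>
    let var := (x :: xs).getLast (List.cons_ne_nil x xs)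
    let rest := (x :: xs).dropLast
    let r := (PySem.Dict.getD (PySem.Dict.mk deps) var []).foldl
      (fun (p : PySem.Set String × List String) inp =>
        if !PySem.Set.contains p.1 inp
        then (PySem.Set.add p.1 inp, p.2 ++ [inp])
        else p)
      (u, rest)
    loopB deps fuel r.1 r.2

def compute_useful_alt (dependencies : List (String × List String)) (dependent_vars : List String) : List String :=
  PySem.List.sorted
    (loopB dependencies
      (2 * dependent_vars.length + (dependencies.flatMap (fun p => p.2)).length + 1)
      (PySem.Set.ofList dependent_vars) dependent_vars)
    (fun x => x) false

-- ===== PRECONDITION & SPEC =====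
-- Pre_ excludes association lists with duplicate keys: they do not arise from a Python
-- dict (A's argument is a dict, where a duplicate key collapses to its last value), and
-- on them the 'iterate every entry' / 'first-match lookup' readings diverge.
def Pre_compute_useful (dependencies : List (String × List String)) (dependent_vars : List String) : Prop :=
  (dependencies.map Prod.fst).Nodup
instance (dependencies : List (String × List String)) (dependent_vars : List String) : Decidable (Pre_compute_useful dependencies dependent_vars) := by unfold Pre_compute_useful; infer_instance

def pvWitness_compute_useful : (List (String × List String)) × List String :=
  ([("a", ["b", "c"]), ("b", ["d"])], ["a"])

def Spec_compute_useful (dependencies : List (String × List String)) (dependent_vars : List String) (out : List String) : Prop := out = compute_useful_alt dependencies dependent_vars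
instance (dependencies : List (String × List String)) (dependent_vars : List String) (out : List String) : Decidable (Spec_compute_useful dependencies dependent_vars out) := by unfold Spec_compute_useful; infer_instance

-- ===== CLAIM (what is proved, stated in full; the proofs are below) =====
def Claim_equal_compute_useful : Prop := ∀ (dependencies : List (String × List String)) (dependent_vars : List String), Dom_compute_useful dependencies dependent_vars → Pre_compute_useful dependencies dependent_vars → Spec_compute_useful dependencies dependent_vars (compute_useful dependencies dependent_vars)

-- ===== LEMMAS AND PROOFS =====

-- x is useful: a seed, or an input of a useful variable (the closure both loops compute)
inductive Reach (deps : List (String × List String)) (seeds : List String) : String → Prop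
  | seed {x : String} : x ∈ seeds → Reach deps seeds x
  | step {v : String} {ins : List String} {x : String} :
      (v, ins) ∈ deps → Reach deps seeds v → x ∈ ins → Reach deps seeds x

-- proof-side names for the two fold bodies (definitionally the ports' folds)
def foldA (l : List (String × List String)) (acc : PySem.Set String × Bool) :
    PySem.Set String × Bool :=
  l.foldl
    (fun acc vi =>
      if PySem.Set.contains acc.1 vi.1 && vi.2.any (fun inp => !PySem.Set.contains acc.1 inp)
      then (PySem.Set.update acc.1 vi.2, true)
      else acc)
    acc

theorem passA_eq_foldA (deps : List (String × List String)) (u : PySem.Set String) :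
    passA deps u = foldA deps (u, false) := rfl

def foldB (inps : List String) (p : PySem.Set String × List String) :
    PySem.Set String × List String :=
  inps.foldl
    (fun (p : PySem.Set String × List String) inp =>
      if !PySem.Set.contains p.1 inp
      then (PySem.Set.add p.1 inp, p.2 ++ [inp])
      else p)
    p

theorem loopB_cons (deps : List (String × List String)) (fuel : Nat)
    (u : PySem.Set String) (x : String) (xs : List String) :
    loopB deps (fuel + 1) u (x :: xs) =
      loopB deps fuel
        (foldB (PySem.Dict.getD (PySem.Dict.mk deps)
            ((x :: xs).getLast (List.cons_ne_nil x xs)) [])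
          (u, (x :: xs).dropLast)).1
        (foldB (PySem.Dict.getD (PySem.Dict.mk deps)
            ((x :: xs).getLast (List.cons_ne_nil x xs)) [])
          (u, (x :: xs).dropLast)).2 := rfl

-- ---- A side ----

theorem len_update_ge (s : PySem.Set String) (xs : List String) :
    s.length ≤ (s.update xs).length := by
  rw [PySem.Set.update_eq_append_filter]
  simp

theorem len_update_lt (s : PySem.Set String) (xs : List String) {y : String}
    (hy : y ∈ xs) (hn : y ∉ s) : s.length < (s.update xs).length := by
  rw [PySem.Set.update_eq_append_filter]
  have hmem : y ∈ (PySem.Set.ofList xs).filter (fun z => !s.contains z) := by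
    simp only [List.mem_filter, PySem.Set.mem_ofList]
    exact ⟨hy, by simpa using hn⟩
  have := List.length_pos_of_mem hmem
  simp only [List.length_append]
  omega

theorem foldA_inv (P : String → Prop) (l : List (String × List String))
    (hstep : ∀ vi ∈ l, P vi.1 → ∀ y ∈ vi.2, P y) :
    ∀ (u : PySem.Set String) (ch : Bool),
    (∀ y ∈ u, y ∈ (foldA l (u, ch)).1) ∧
    (∀ y ∈ (foldA l (u, ch)).1, y ∈ u ∨ y ∈ l.flatMap (fun p => p.2)) ∧
    (u.Nodup → (foldA l (u, ch)).1.Nodup) ∧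
    (ch = true → (foldA l (u, ch)).2 = true) ∧
    ((foldA l (u, ch)).2 = false →
      (foldA l (u, ch)).1 = u ∧ ch = false ∧ (∀ vi ∈ l, vi.1 ∈ u → ∀ y ∈ vi.2, y ∈ u)) ∧
    (u.length ≤ (foldA l (u, ch)).1.length) ∧
    ((foldA l (u, ch)).2 = true → ch = false → u.length < (foldA l (u, ch)).1.length) ∧
    ((∀ y ∈ u, P y) → ∀ y ∈ (foldA l (u, ch)).1, P y) := by
  induction l with
  | nil =>
    intro u ch
    simp [foldA]
  | cons vi l ih =>
    have hstep' : ∀ vi' ∈ l, P vi'.1 → ∀ y ∈ vi'.2, P y :=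
      fun vi' h' => hstep vi' (List.mem_cons_of_mem _ h')
    intro u ch
    by_cases hcond : vi.1 ∈ u ∧ ∃ z ∈ vi.2, z ∉ u
    · have e : foldA (vi :: l) (u, ch) = foldA l (PySem.Set.update u vi.2, true) := by
        simp [foldA, hcond]
      rw [e]
      obtain ⟨i1, i2, i3, i4, i5, i6, i7, i8⟩ := ih hstep' (PySem.Set.update u vi.2) true
      have hv1 : vi.1 ∈ u := hcond.1
      have hsome : ∃ z ∈ vi.2, z ∉ u := hcond.2
      have hmemup : ∀ y, y ∈ PySem.Set.update u vi.2 ↔ y ∈ u ∨ y ∈ vi.2 :=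
        fun y => PySem.Set.mem_update u vi.2 y
      refine ⟨?_, ?_, ?_, fun _ => i4 rfl, ?_, ?_, ?_, ?_⟩
      · exact fun y hy => i1 y ((hmemup y).mpr (Or.inl hy))
      · intro y hy
        rcases i2 y hy with hy' | hy'
        · rcases (hmemup y).mp hy' with h' | h'
          · exact Or.inl h'
          · exact Or.inr (List.mem_flatMap.mpr ⟨vi, List.mem_cons_self .., h'⟩)
        · obtain ⟨a, ha, hya⟩ := List.mem_flatMap.mp hy'
          exact Or.inr (List.mem_flatMap.mpr ⟨a, List.mem_cons_of_mem _ ha, hya⟩)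
      · exact fun hn => i3 (PySem.Set.nodup_update u vi.2 hn)
      · intro hf
        exact absurd (i4 rfl) (by simp [hf])
      · calc u.length ≤ (PySem.Set.update u vi.2).length := len_update_ge u vi.2
          _ ≤ _ := i6
      · intro _ _
        obtain ⟨z, hz, hzn⟩ := hsome
        calc u.length < (PySem.Set.update u vi.2).length := len_update_lt u vi.2 hz hzn
          _ ≤ _ := i6
      · intro hP
        refine i8 ?_
        intro y hy
        rcases (hmemup y).mp hy with h' | h'
        · exact hP y h'
        · exact hstep vi (List.mem_cons_self ..) (hP vi.1 hv1) y h'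
    · have hb : (PySem.Set.contains u vi.1 && vi.2.any fun inp => !PySem.Set.contains u inp)
          = false := by
        rw [Bool.eq_false_iff]
        intro hbt
        apply hcond
        simpa using hbt
      have e : foldA (vi :: l) (u, ch) = foldA l (u, ch) := by
        simp only [foldA, List.foldl_cons, hb]
        norm_num
      rw [e]
      obtain ⟨i1, i2, i3, i4, i5, i6, i7, i8⟩ := ih hstep' u ch
      refine ⟨i1, ?_, i3, i4, ?_, i6, i7, i8⟩
      · intro y hy
        rcases i2 y hy with hy' | hy'
        · exact Or.inl hy'
        · obtain ⟨a, ha, hya⟩ := List.mem_flatMap.mp hy'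
          exact Or.inr (List.mem_flatMap.mpr ⟨a, List.mem_cons_of_mem _ ha, hya⟩)
      · intro hf
        obtain ⟨e1, e2, e3⟩ := i5 hf
        refine ⟨e1, e2, ?_⟩
        intro vi' hvi' hv1 y hy
        rcases List.mem_cons.mp hvi' with rfl | hvi'
        · by_contra hyn
          exact hcond ⟨hv1, y, hy, hyn⟩
        · exact e3 vi' hvi' hv1 y hy

theorem loopA_spec (P : String → Prop) (deps : List (String × List String)) (univ : List String)
    (hstep : ∀ vi ∈ deps, P vi.1 → ∀ y ∈ vi.2, P y)
    (hdom : ∀ y ∈ deps.flatMap (fun p => p.2), y ∈ univ) :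
    ∀ (fuel : Nat) (u : PySem.Set String),
    u.Nodup → (∀ y ∈ u, y ∈ univ) → (∀ y ∈ u, P y) →
    univ.length + 1 ≤ fuel + u.length →
    (∀ y ∈ u, y ∈ loopA deps fuel u) ∧
    (loopA deps fuel u).Nodup ∧
    (∀ y ∈ loopA deps fuel u, P y) ∧
    (∀ vi ∈ deps, vi.1 ∈ loopA deps fuel u → ∀ y ∈ vi.2, y ∈ loopA deps fuel u) := by
  intro fuel
  induction fuel with
  | zero =>
    intro u hnd hsub hP hfuel
    exfalso
    have : u.length ≤ univ.length := (hnd.subperm hsub).length_le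
    omega
  | succ fuel ih =>
    intro u hnd hsub hP hfuel
    obtain ⟨i1, i2, i3, i4, i5, i6, i7, i8⟩ := foldA_inv P deps hstep u false
    by_cases hch : (foldA deps (u, false)).2 = true
    · have e : loopA deps (fuel + 1) u = loopA deps fuel (foldA deps (u, false)).1 := by
        simp [loopA, passA_eq_foldA, hch]
      have hlt : u.length < (foldA deps (u, false)).1.length := i7 hch rfl
      obtain ⟨j1, j2, j3, j4⟩ := ih (foldA deps (u, false)).1 (i3 hnd)
        (fun y hy => (i2 y hy).elim (hsub y) (hdom y)) (i8 hP) (by omega)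
      rw [e]
      exact ⟨fun y hy => j1 y (i1 y hy), j2, j3, j4⟩
    · have hch' : (foldA deps (u, false)).2 = false := by simpa using hch
      have e : loopA deps (fuel + 1) u = (foldA deps (u, false)).1 := by
        simp [loopA, passA_eq_foldA, hch']
      obtain ⟨e1, _, e3⟩ := i5 hch'
      rw [e, e1]
      exact ⟨fun y hy => hy, hnd, hP, e3⟩

-- ---- B side ----

theorem foldB_inv (inps : List String) :
    ∀ (u : PySem.Set String) (st : List String),
    (∀ y ∈ u, y ∈ (foldB inps (u, st)).1) ∧
    (∀ y ∈ (foldB inps (u, st)).1, y ∈ u ∨ y ∈ inps) ∧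
    (∀ y ∈ inps, y ∈ (foldB inps (u, st)).1) ∧
    (∀ y ∈ st, y ∈ (foldB inps (u, st)).2) ∧
    (∀ y ∈ (foldB inps (u, st)).2, y ∈ st ∨ y ∈ (foldB inps (u, st)).1) ∧
    (∀ y ∈ (foldB inps (u, st)).1, y ∈ u ∨ y ∈ (foldB inps (u, st)).2) ∧
    (u.Nodup → (foldB inps (u, st)).1.Nodup) ∧
    ((foldB inps (u, st)).2.length + u.length = st.length + (foldB inps (u, st)).1.length) := by
  induction inps with
  | nil =>
    intro u st
    simp [foldB]
    exact ⟨fun y hy => Or.inl hy, fun y hy => Or.inl hy⟩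
  | cons inp inps ih =>
    intro u st
    by_cases h : inp ∈ u
    · have e : foldB (inp :: inps) (u, st) = foldB inps (u, st) := by
        simp [foldB, h]
      rw [e]
      obtain ⟨i1, i2, i3, i4, i5, i6, i7, i8⟩ := ih u st
      refine ⟨i1, fun y hy => (i2 y hy).imp id (List.mem_cons_of_mem _), ?_, i4, i5, i6, i7, i8⟩
      intro y hy
      rcases List.mem_cons.mp hy with rfl | hy
      · exact i1 y h
      · exact i3 y hy
    · have e : foldB (inp :: inps) (u, st) = foldB inps (PySem.Set.add u inp, st ++ [inp]) := by
        simp [foldB, h]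
      rw [e]
      obtain ⟨i1, i2, i3, i4, i5, i6, i7, i8⟩ := ih (PySem.Set.add u inp) (st ++ [inp])
      have hadd : ∀ y, y ∈ PySem.Set.add u inp ↔ y ∈ u ∨ y = inp :=
        fun y => PySem.Set.mem_add u inp y
      have hinpmem : inp ∈ (foldB inps (PySem.Set.add u inp, st ++ [inp])).1 :=
        i1 inp ((hadd inp).mpr (Or.inr rfl))
      have hinpst : inp ∈ (foldB inps (PySem.Set.add u inp, st ++ [inp])).2 :=
        i4 inp (by simp)
      refine ⟨?_, ?_, ?_, ?_, ?_, ?_, ?_, ?_⟩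
      · exact fun y hy => i1 y ((hadd y).mpr (Or.inl hy))
      · intro y hy
        rcases i2 y hy with hy' | hy'
        · rcases (hadd y).mp hy' with h' | rfl
          · exact Or.inl h'
          · exact Or.inr (List.mem_cons_self ..)
        · exact Or.inr (List.mem_cons_of_mem _ hy')
      · intro y hy
        rcases List.mem_cons.mp hy with rfl | hy
        · exact hinpmem
        · exact i3 y hy
      · exact fun y hy => i4 y (List.mem_append_left _ hy)
      · intro y hy
        rcases i5 y hy with hy' | hy'
        · rcases List.mem_append.mp hy' with h' | h'
          · exact Or.inl h'
          · simp only [List.mem_singleton] at h'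
            subst h'
            exact Or.inr hinpmem
        · exact Or.inr hy'
      · intro y hy
        rcases i6 y hy with hy' | hy'
        · rcases (hadd y).mp hy' with h' | rfl
          · exact Or.inl h'
          · exact Or.inr hinpst
        · exact Or.inr hy'
      · exact fun hn => i7 (PySem.Set.nodup_add u inp hn)
      · have hlen : (PySem.Set.add u inp).length = u.length + 1 := by
          rw [PySem.Set.add_of_not_mem h]
          simp
        have hlen2 : (st ++ [inp]).length = st.length + 1 := by simp
        omega

theorem loopB_spec (P : String → Prop) (deps : List (String × List String)) (univ : List String)
    (hstep : ∀ v, P v → ∀ y ∈ PySem.Dict.getD (PySem.Dict.mk deps) v [], P y)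
    (hdom : ∀ v, ∀ y ∈ PySem.Dict.getD (PySem.Dict.mk deps) v [], y ∈ univ) :
    ∀ (fuel : Nat) (u : PySem.Set String) (stack : List String),
    u.Nodup → (∀ y ∈ stack, y ∈ u) → (∀ y ∈ u, y ∈ univ) → (∀ y ∈ u, P y) →
    (∀ v ∈ u, v ∈ stack ∨ ∀ y ∈ PySem.Dict.getD (PySem.Dict.mk deps) v [], y ∈ u) →
    univ.length + stack.length + 1 ≤ fuel + u.length →
    (∀ y ∈ u, y ∈ loopB deps fuel u stack) ∧
    (loopB deps fuel u stack).Nodup ∧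
    (∀ y ∈ loopB deps fuel u stack, P y) ∧
    (∀ v ∈ loopB deps fuel u stack, ∀ y ∈ PySem.Dict.getD (PySem.Dict.mk deps) v [],
      y ∈ loopB deps fuel u stack) := by
  intro fuel
  induction fuel with
  | zero =>
    intro u stack hnd hstk hsub hP hI hfuel
    cases stack with
    | nil =>
      exact ⟨fun y hy => hy, hnd, hP,
        fun v hv => (hI v hv).resolve_left (by simp)⟩
    | cons x xs =>
      exfalso
      have : u.length ≤ univ.length := (hnd.subperm hsub).length_le
      simp only [List.length_cons] at hfuel
      omega
  | succ fuel ih =>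
    intro u stack hnd hstk hsub hP hI hfuel
    cases stack with
    | nil =>
      exact ⟨fun y hy => hy, hnd, hP,
        fun v hv => (hI v hv).resolve_left (by simp)⟩
    | cons x xs =>
      have hne : (x :: xs : List String) ≠ [] := List.cons_ne_nil x xs
      set var := (x :: xs).getLast hne with hvar
      set rest := (x :: xs).dropLast with hrest
      set inps := PySem.Dict.getD (PySem.Dict.mk deps) var [] with hinps
      obtain ⟨i1, i2, i3, i4, i5, i6, i7, i8⟩ := foldB_inv inps u rest
      have hvaru : var ∈ u := hstk var (List.getLast_mem hne)
      have hrestsub : ∀ y ∈ rest, y ∈ u :=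
        fun y hy => hstk y ((List.dropLast_sublist (x :: xs)).subset hy)
      have hsplit : rest ++ [var] = x :: xs := List.dropLast_append_getLast hne
      have hrlen : rest.length + 1 = (x :: xs).length := by
        rw [← hsplit]; simp
      obtain ⟨j1, j2, j3, j4⟩ := ih (foldB inps (u, rest)).1 (foldB inps (u, rest)).2
        (i7 hnd)
        (fun y hy => (i5 y hy).elim (fun h => i1 y (hrestsub y h)) id)
        (fun y hy => (i2 y hy).elim (hsub y) (hdom var y))
        (fun y hy => (i2 y hy).elim (hP y) (hstep var (hP var hvaru) y))
        (by
          intro v hv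
          rcases i6 v hv with hvu | hvr
          · rcases hI v hvu with hvstk | hcl
            · rw [← hsplit] at hvstk
              rcases List.mem_append.mp hvstk with h' | h'
              · exact Or.inl (i4 v h')
              · simp only [List.mem_singleton] at h'
                subst h'
                exact Or.inr (fun y hy => i3 y hy)
            · exact Or.inr (fun y hy => i1 y (hcl y hy))
          · exact Or.inl hvr)
        (by have hxx : (x :: xs).length = xs.length + 1 := by simp
            omega)
      rw [loopB_cons]
      exact ⟨fun y hy => j1 y (i1 y hy), j2, j3, j4⟩

-- ---- tying both results to the closure ----

theorem stepA_Reach (deps : List (String × List String)) (dv : List String) :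
    ∀ vi ∈ deps, Reach deps dv vi.1 → ∀ y ∈ vi.2, Reach deps dv y := by
  rintro ⟨v, ins⟩ hvi hr y hy
  exact Reach.step hvi hr hy

theorem loopA_spec' (P : String → Prop) (deps : List (String × List String)) (dv : List String)
    (hstep : ∀ vi ∈ deps, P vi.1 → ∀ y ∈ vi.2, P y)
    (hP0 : ∀ y ∈ dv, P y) :
    (∀ y ∈ PySem.Set.ofList dv,
      y ∈ loopA deps (dv.length + (deps.flatMap (fun p => p.2)).length + 1)
        (PySem.Set.ofList dv)) ∧
    (loopA deps (dv.length + (deps.flatMap (fun p => p.2)).length + 1)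
        (PySem.Set.ofList dv)).Nodup ∧
    (∀ y ∈ loopA deps (dv.length + (deps.flatMap (fun p => p.2)).length + 1)
        (PySem.Set.ofList dv), P y) ∧
    (∀ vi ∈ deps,
      vi.1 ∈ loopA deps (dv.length + (deps.flatMap (fun p => p.2)).length + 1)
        (PySem.Set.ofList dv) →
      ∀ y ∈ vi.2, y ∈ loopA deps (dv.length + (deps.flatMap (fun p => p.2)).length + 1)
        (PySem.Set.ofList dv)) := by
  have hlen : (dv ++ deps.flatMap (fun p => p.2)).length
      = dv.length + (deps.flatMap (fun p => p.2)).length := by simp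
  exact loopA_spec P deps (dv ++ deps.flatMap (fun p => p.2)) hstep
    (fun y hy => List.mem_append_right _ hy)
    (dv.length + (deps.flatMap (fun p => p.2)).length + 1)
    (PySem.Set.ofList dv)
    (PySem.Set.nodup_ofList dv)
    (fun y hy => List.mem_append_left _ (by simpa [PySem.Set.mem_ofList] using hy))
    (fun y hy => hP0 y (by simpa [PySem.Set.mem_ofList] using hy))
    (by omega)

theorem resultA_iff_Reach (deps : List (String × List String)) (dv : List String) :
    ∀ x, x ∈ loopA deps (dv.length + (deps.flatMap (fun p => p.2)).length + 1)
        (PySem.Set.ofList dv) ↔ Reach deps dv x := by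
  obtain ⟨m1, _, m3, m4⟩ := loopA_spec' (Reach deps dv) deps dv (stepA_Reach deps dv)
    (fun y hy => Reach.seed hy)
  intro x
  refine ⟨m3 x, ?_⟩
  intro h
  induction h with
  | seed hx => exact m1 _ (by simpa [PySem.Set.mem_ofList] using hx)
  | step hd _ hin ih => exact m4 _ hd ih _ hin

theorem resultA_nodup (deps : List (String × List String)) (dv : List String) :
    (loopA deps (dv.length + (deps.flatMap (fun p => p.2)).length + 1)
        (PySem.Set.ofList dv)).Nodup :=
  (loopA_spec' (fun _ => True) deps dv (fun _ _ _ _ _ => trivial) (fun _ _ => trivial)).2.1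

theorem getD_mk_sub_univ (deps : List (String × List String)) (dv : List String) :
    ∀ v, ∀ y ∈ PySem.Dict.getD (PySem.Dict.mk deps) v [],
      y ∈ dv ++ deps.flatMap (fun p => p.2) := by
  intro v y hy
  cases hq : (PySem.Dict.mk deps).get? v with
  | none => rw [PySem.Dict.getD_eq_get?_getD, hq] at hy; simp at hy
  | some ins =>
    have hm : (v, ins) ∈ deps := PySem.Dict.mem_items_of_get?_eq_some _ hq
    rw [PySem.Dict.getD_eq_get?_getD, hq] at hy
    exact List.mem_append_right _ (List.mem_flatMap.mpr ⟨(v, ins), hm, by simpa using hy⟩)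

theorem stepB_Reach (deps : List (String × List String)) (dv : List String) :
    ∀ v, Reach deps dv v →
      ∀ y ∈ PySem.Dict.getD (PySem.Dict.mk deps) v [], Reach deps dv y := by
  intro v hv y hy
  cases hq : (PySem.Dict.mk deps).get? v with
  | none => rw [PySem.Dict.getD_eq_get?_getD, hq] at hy; simp at hy
  | some ins =>
    have hm : (v, ins) ∈ deps := PySem.Dict.mem_items_of_get?_eq_some _ hq
    rw [PySem.Dict.getD_eq_get?_getD, hq] at hy
    exact Reach.step hm hv (by simpa using hy)

theorem loopB_spec' (P : String → Prop) (deps : List (String × List String)) (dv : List String)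
    (hstep : ∀ v, P v → ∀ y ∈ PySem.Dict.getD (PySem.Dict.mk deps) v [], P y)
    (hP0 : ∀ y ∈ dv, P y) :
    (∀ y ∈ PySem.Set.ofList dv,
      y ∈ loopB deps (2 * dv.length + (deps.flatMap (fun p => p.2)).length + 1)
        (PySem.Set.ofList dv) dv) ∧
    (loopB deps (2 * dv.length + (deps.flatMap (fun p => p.2)).length + 1)
        (PySem.Set.ofList dv) dv).Nodup ∧
    (∀ y ∈ loopB deps (2 * dv.length + (deps.flatMap (fun p => p.2)).length + 1)
        (PySem.Set.ofList dv) dv, P y) ∧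
    (∀ v ∈ loopB deps (2 * dv.length + (deps.flatMap (fun p => p.2)).length + 1)
        (PySem.Set.ofList dv) dv,
      ∀ y ∈ PySem.Dict.getD (PySem.Dict.mk deps) v [],
        y ∈ loopB deps (2 * dv.length + (deps.flatMap (fun p => p.2)).length + 1)
          (PySem.Set.ofList dv) dv) := by
  have hlen : (dv ++ deps.flatMap (fun p => p.2)).length
      = dv.length + (deps.flatMap (fun p => p.2)).length := by simp
  have hlen2 : (PySem.Set.ofList dv).length ≤ dv.length := PySem.Set.length_ofList_le dv
  exact loopB_spec P deps (dv ++ deps.flatMap (fun p => p.2)) hstep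
    (getD_mk_sub_univ deps dv)
    (2 * dv.length + (deps.flatMap (fun p => p.2)).length + 1)
    (PySem.Set.ofList dv) dv
    (PySem.Set.nodup_ofList dv)
    (fun y hy => by simpa [PySem.Set.mem_ofList] using hy)
    (fun y hy => List.mem_append_left _ (by simpa [PySem.Set.mem_ofList] using hy))
    (fun y hy => hP0 y (by simpa [PySem.Set.mem_ofList] using hy))
    (fun v hv => Or.inl (by simpa [PySem.Set.mem_ofList] using hv))
    (by omega)

theorem resultB_iff_Reach (deps : List (String × List String)) (dv : List String)
    (hkeys : (deps.map Prod.fst).Nodup) :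
    ∀ x, x ∈ loopB deps (2 * dv.length + (deps.flatMap (fun p => p.2)).length + 1)
        (PySem.Set.ofList dv) dv ↔ Reach deps dv x := by
  obtain ⟨m1, _, m3, m4⟩ := loopB_spec' (Reach deps dv) deps dv (stepB_Reach deps dv)
    (fun y hy => Reach.seed hy)
  have hgetD : ∀ v ins, (v, ins) ∈ deps →
      PySem.Dict.getD (PySem.Dict.mk deps) v [] = ins := by
    intro v ins h
    exact PySem.Dict.getD_of_mem_items (PySem.Dict.mk deps) h
      (by rw [PySem.Dict.keys_mk]; simpa using hkeys) []
  intro x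
  refine ⟨m3 x, ?_⟩
  intro h
  induction h with
  | seed hx => exact m1 _ (by simpa [PySem.Set.mem_ofList] using hx)
  | step hd _ hin ih =>
    exact m4 _ ih _ (by rw [hgetD _ _ hd]; exact hin)

theorem resultB_nodup (deps : List (String × List String)) (dv : List String) :
    (loopB deps (2 * dv.length + (deps.flatMap (fun p => p.2)).length + 1)
        (PySem.Set.ofList dv) dv).Nodup :=
  (loopB_spec' (fun _ => True) deps dv (fun _ _ _ _ => trivial) (fun _ _ => trivial)).2.1

-- ===== VERDICT (by name: the statement is the Claim_ definition above) =====
theorem compute_useful_spec : Claim_equal_compute_useful := by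
  intro deps dv _hDom hPre
  unfold Spec_compute_useful compute_useful compute_useful_alt
  exact PySem.List.sorted_eq_sorted_of_perm _ _ (fun x => x) (fun _ _ h => h)
    ((List.perm_ext_iff_of_nodup (resultA_nodup deps dv) (resultB_nodup deps dv)).mpr
      (fun x => (resultA_iff_Reach deps dv x).trans (resultB_iff_Reach deps dv hPre x).symm))
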